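-- pv_equiv track=rewrite | github.com/AlexandreKarakas/Algo_texte | Document.py | ParcoursNaif
-- ===== SOURCE A (Python) =====
-- def ParcoursNaif(terme, document) :
--     occ = 0
--     m = len(terme)
--     n = len(document)
--     for i in range(0, n-m+1):
--         j = 1
--         while (j < m and comparer_lettre(document[i+j-1], terme[j-1])) :
--             j = j+1
--         if (j == m) :
--             occ = occ + 1
--     return occ
--
-- def comparer_lettre (c1, c2) :
--     if (c1 == c2) :
--         return 1
--     else :
--         return 0
-- ===== SOURCE B (Python) =====
-- def ParcoursNaif(terme, document):
--     # Count (possibly overlapping) occurrences of terme in document,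
--     # jumping from match to match with str.find.
--     occ = 0
--     i = document.find(terme)
--     while i != -1:
--         occ += 1
--         i = document.find(terme, i + 1)
--     return occ
-- ===== Notes on version B (the rewrite author's own statement) =====
-- stated objective: faster
-- what changed: B counts occurrences of terme by jumping between matches with str.find instead of A's per-position character-by-character rescans that skip the last character.
-- intended difference: When terme is empty (A returns 0, B returns len(document)+1, Python's convention for the empty pattern) or when terme minus its last character occurs at a position where terme itself does not (A, which never compares terme's last character, over-counts, e.g. A('ab','ac')=1), B returns the true number of occurrences of terme, which is what a naive matcher is meant to compute. — e.g. on ParcoursNaif("ab", "ac"): A returns 1, B returns 0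
import Mathlib
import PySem

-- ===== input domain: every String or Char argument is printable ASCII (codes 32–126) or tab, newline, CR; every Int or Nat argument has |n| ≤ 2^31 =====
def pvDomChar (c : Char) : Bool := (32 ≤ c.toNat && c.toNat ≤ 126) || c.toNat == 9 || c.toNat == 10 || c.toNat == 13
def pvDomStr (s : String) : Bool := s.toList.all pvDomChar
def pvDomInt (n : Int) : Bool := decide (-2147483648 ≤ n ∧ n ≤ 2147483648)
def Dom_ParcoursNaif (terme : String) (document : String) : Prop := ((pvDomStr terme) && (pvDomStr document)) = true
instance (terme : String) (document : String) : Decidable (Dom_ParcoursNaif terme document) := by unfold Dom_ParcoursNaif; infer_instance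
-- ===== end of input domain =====

-- B counts occurrences of terme by str.find jumps (objective: faster); A skips terme's last
-- character, so on the D_ inputs below the two values differ and B's is the intended count.

-- ===== PORT A =====
def pvCompareLettre (c1 c2 : Char) : Int := if c1 = c2 then 1 else 0

-- inner 'while' of A; the pyGetD default ' ' is never consulted: for every i produced by the
-- outer range and every j with 1 ≤ j < m the indices i+j-1 and j-1 are in range in the Python.
def pvInner (terme document : List Char) (m : Nat) (i : Int) (j : Nat) : Nat :=
  if h : j < m ∧ pvCompareLettre (PySem.List.pyGetD document (i + (j : Int) - 1) ' ')
      (PySem.List.pyGetD terme ((j : Int) - 1) ' ') = 1 then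
    pvInner terme document m i (j + 1)
  else j
termination_by m - j
decreasing_by omega

def ParcoursNaif (terme : String) (document : String) : Int :=
  let t := terme.toList
  let d := document.toList
  let m := t.length
  let n := d.length
  (PySem.List.pyRange 0 ((n : Int) - (m : Int) + 1)).foldl
    (fun occ i => if pvInner t d m i 1 = m then occ + 1 else occ) 0

-- ===== PORT B =====
-- B's while loop: i jumps between matches via document.find(terme, i+1); fuel d.length+2 is a
-- termination device only (i strictly increases, so the loop runs at most d.length+1 times).
def pvFindLoop (t d : List Char) : Int → Nat → Int
  | _, 0 => 0
  | i, fuel + 1 =>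
    if i ≠ -1 then 1 + pvFindLoop t d (PySem.Chars.findFrom d t (i + 1) none) fuel
    else 0

def ParcoursNaif_alt (terme : String) (document : String) : Int :=
  let t := terme.toList
  let d := document.toList
  pvFindLoop t d (PySem.Chars.find d t) (d.length + 2)

-- ===== PRECONDITION & SPEC =====
-- When terme is empty (A returns 0, B len(document)+1, Python's convention for the empty
-- pattern) or terme minus its last character occurs where terme itself does not (A, which never
-- compares terme's last character, over-counts), B returns the true occurrence count of terme.
def D_ParcoursNaif (terme : String) (document : String) : Prop :=
  terme = "" ∨ ∃ i ∈ List.range (document.toList.length + 1 - terme.toList.length),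
    terme.toList.dropLast <+: document.toList.drop i ∧ ¬ terme.toList <+: document.toList.drop i
instance (terme : String) (document : String) : Decidable (D_ParcoursNaif terme document) := by
  unfold D_ParcoursNaif; infer_instance

def Spec_ParcoursNaif (terme : String) (document : String) (out : Int) : Prop :=
  ¬ D_ParcoursNaif terme document → out = ParcoursNaif_alt terme document
instance (terme : String) (document : String) (out : Int) : Decidable (Spec_ParcoursNaif terme document out) := by
  unfold Spec_ParcoursNaif; infer_instance

def pvDiffWitness_ParcoursNaif : String × String := ("ab", "ac")
def pvDiffWitnessOut_ParcoursNaif : Int × Int := (1, 0)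

-- ===== CLAIM (what is proved, stated in full; the proofs are below) =====
def Claim_unchanged_ParcoursNaif : Prop := ∀ (terme : String) (document : String),
  Dom_ParcoursNaif terme document → Spec_ParcoursNaif terme document (ParcoursNaif terme document)
def Claim_changed_ParcoursNaif : Prop :=
  Dom_ParcoursNaif (pvDiffWitness_ParcoursNaif.1) (pvDiffWitness_ParcoursNaif.2) ∧
  D_ParcoursNaif (pvDiffWitness_ParcoursNaif.1) (pvDiffWitness_ParcoursNaif.2) ∧
  ParcoursNaif (pvDiffWitness_ParcoursNaif.1) (pvDiffWitness_ParcoursNaif.2) = pvDiffWitnessOut_ParcoursNaif.1 ∧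
  ParcoursNaif_alt (pvDiffWitness_ParcoursNaif.1) (pvDiffWitness_ParcoursNaif.2) = pvDiffWitnessOut_ParcoursNaif.2 ∧
  pvDiffWitnessOut_ParcoursNaif.1 ≠ pvDiffWitnessOut_ParcoursNaif.2
def Claim_exact_ParcoursNaif : Prop := ∀ (terme : String) (document : String),
  Dom_ParcoursNaif terme document → D_ParcoursNaif terme document →
  ParcoursNaif terme document ≠ ParcoursNaif_alt terme document

-- ===== LEMMAS AND PROOFS =====

-- how many start positions k+off, off < W-k, carry p as a prefix
def pvCnt (p d : List Char) (W k : Nat) : Nat :=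
  List.countP (fun off => decide (p <+: d.drop (k + off))) (List.range (W - k))

lemma pvCompareLettre_eq_one (c1 c2 : Char) : pvCompareLettre c1 c2 = 1 ↔ c1 = c2 := by
  by_cases h : c1 = c2 <;> simp [pvCompareLettre, h]

lemma pvInner_char (t d : List Char) (m : Nat) (i : Nat) :
    ∀ j, 1 ≤ j → j ≤ m →
      (pvInner t d m (i : Int) j = m ↔
        ∀ u, j - 1 ≤ u → u < m - 1 → d.getD (i + u) ' ' = t.getD u ' ') := by
  intro j
  induction hmj : m - j generalizing j with
  | zero =>
    intro h1 hjm
    have hj : j = m := by omega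
    rw [pvInner, dif_neg (fun hc => absurd hc.1 (by omega))]
    exact ⟨fun _ u hu1 hu2 => absurd hu2 (by omega), fun _ => hj⟩
  | succ w ih =>
    intro h1 hjm
    have hjm' : j < m := by omega
    have hidx : ((i : Int) + (j : Int) - 1) = ((i + (j - 1) : Nat) : Int) := by omega
    have hidx2 : ((j : Int) - 1) = ((j - 1 : Nat) : Int) := by omega
    rw [pvInner]
    by_cases hE : d.getD (i + (j - 1)) ' ' = t.getD (j - 1) ' '
    · rw [dif_pos ⟨hjm', by
        rw [hidx, hidx2, PySem.List.pyGetD_natCast, PySem.List.pyGetD_natCast,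
          pvCompareLettre_eq_one]
        exact hE⟩]
      rw [ih (j + 1) (by omega) (by omega) (by omega)]
      constructor
      · intro H u hu1 hu2
        rcases Nat.lt_or_ge u j with h | h
        · have hu : u = j - 1 := by omega
          rw [hu]; exact hE
        · exact H u (by omega) hu2
      · intro H u hu1 hu2
        exact H u (by omega) hu2
    · have hcond : ¬(j < m ∧ pvCompareLettre (PySem.List.pyGetD d ((i : Int) + (j : Int) - 1) ' ')
          (PySem.List.pyGetD t ((j : Int) - 1) ' ') = 1) := by
        rintro ⟨_, hc⟩
        rw [hidx, hidx2, PySem.List.pyGetD_natCast, PySem.List.pyGetD_natCast,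
          pvCompareLettre_eq_one] at hc
        exact hE hc
      rw [dif_neg hcond]
      constructor
      · intro H
        exact absurd H (by omega)
      · intro H
        exact absurd (H (j - 1) (le_refl _) (by omega)) hE

lemma pvPrefix_char (t d : List Char) (i : Nat)
    (hm : 1 ≤ t.length) (hw : i + t.length ≤ d.length) :
    (t.dropLast <+: d.drop i ↔
      ∀ u, u < t.length - 1 → d.getD (i + u) ' ' = t.getD u ' ') := by
  rw [List.prefix_iff_eq_take]
  constructor
  · intro H u hu
    have h1 : u < t.dropLast.length := by rw [List.length_dropLast]; omega
    have h2 : i + u < d.length := by omega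
    have h3 : u < t.length := by omega
    have h4 := List.getElem_of_eq H h1
    rw [List.getElem_dropLast] at h4
    rw [List.getD_eq_getElem d ' ' h2, List.getD_eq_getElem t ' ' h3, h4]
    simp [List.getElem_take, List.getElem_drop]
  · intro H
    apply List.ext_getElem
    · simp [List.length_dropLast]
      omega
    · intro u h1 h2
      rw [List.getElem_dropLast]
      have h3 : u < t.length - 1 := by simpa [List.length_dropLast] using h1
      have h5 : i + u < d.length := by omega
      have h6 := H u h3
      rw [List.getD_eq_getElem d ' ' h5, List.getD_eq_getElem t ' ' (by omega)] at h6
      simp [List.getElem_take, List.getElem_drop]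
      exact h6.symm

lemma pvCnt_cons (p d : List Char) (W k : Nat) (hk : k < W) :
    pvCnt p d W k = (if p <+: d.drop k then 1 else 0) + pvCnt p d W (k + 1) := by
  unfold pvCnt
  have h1 : W - k = (W - (k + 1)) + 1 := by omega
  rw [h1, List.range_succ_eq_map, List.countP_cons, List.countP_map]
  have h2 : List.countP ((fun off => decide (p <+: List.drop (k + off) d)) ∘ Nat.succ)
      (List.range (W - (k + 1)))
      = List.countP (fun off => decide (p <+: List.drop (k + 1 + off) d))
        (List.range (W - (k + 1))) := by
    apply List.countP_congr
    intro x _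
    have hx : k + Nat.succ x = k + 1 + x := by omega
    simp only [Function.comp_apply, hx]
  rw [h2]
  by_cases hp : p <+: d.drop k <;> simp [hp] <;> omega

lemma pvCnt_step_miss (p d : List Char) (W k : Nat) (h : ¬ p <+: d.drop k) :
    pvCnt p d W k = pvCnt p d W (k + 1) := by
  by_cases hk : k < W
  · rw [pvCnt_cons p d W k hk, if_neg h, Nat.zero_add]
  · unfold pvCnt
    rw [show W - k = 0 by omega, show W - (k + 1) = 0 by omega]
    simp

lemma pvCnt_skip (p d : List Char) (W : Nat) :
    ∀ j k, k ≤ j → (∀ x, k ≤ x → x < j → ¬ p <+: d.drop x) →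
      pvCnt p d W k = pvCnt p d W j := by
  intro j k hkj
  induction hd : j - k generalizing k with
  | zero =>
    intro _
    have : k = j := by omega
    rw [this]
  | succ w ih =>
    intro hno
    rw [pvCnt_step_miss p d W k (hno k le_rfl (by omega))]
    exact ih (k + 1) (by omega) (by omega) (fun x hx1 hx2 => hno x (by omega) hx2)

lemma pvCnt_hit (p d : List Char) (W k : Nat) (hk : k < W) (h : p <+: d.drop k) :
    pvCnt p d W k = 1 + pvCnt p d W (k + 1) := by
  rw [pvCnt_cons p d W k hk, if_pos h]

lemma pvCnt_zero (p d : List Char) (W k : Nat)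
    (h : ∀ x, k ≤ x → x < W → ¬ p <+: d.drop x) : pvCnt p d W k = 0 := by
  unfold pvCnt
  rw [List.countP_eq_zero]
  intro off hoff
  simp only [List.mem_range] at hoff
  simp only [decide_eq_true_eq]
  exact h (k + off) (by omega) (by omega)

lemma pvFindFrom_past (d t : List Char) (i : Int) (h : (d.length : Int) < i) :
    PySem.Chars.findFrom d t i none = -1 := by
  unfold PySem.Chars.findFrom
  dsimp only
  split_ifs <;> omega

lemma pvFindLoop_neg_one (t d : List Char) (fuel : Nat) : pvFindLoop t d (-1) fuel = 0 := by
  cases fuel <;> simp [pvFindLoop]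

-- B's loop counts the positions ≥ k at which t is a prefix of the rest of d
lemma pvLoop_inv (t d : List Char) :
    ∀ (fuel k : Nat), k ≤ d.length → d.length + 2 ≤ k + fuel →
      pvFindLoop t d (PySem.Chars.findFrom d t (k : Int) none) fuel
        = (pvCnt t d (d.length + 1) k : Int) := by
  intro fuel
  induction fuel with
  | zero => intro k hk hf; omega
  | succ fuel ih =>
    intro k hk hf
    rw [PySem.Chars.findFrom_natCast d t k hk]
    by_cases hfind : PySem.Chars.find (d.drop k) t = -1
    · rw [if_pos hfind]
      have hno : ∀ x, k ≤ x → ¬ t <+: d.drop x := by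
        intro x hx hpre
        apply (PySem.Chars.find_eq_neg_one_iff (d.drop k) t).mp hfind
        have hdx : d.drop x = (d.drop k).drop (x - k) := by
          rw [List.drop_drop]; congr 1; omega
        rw [hdx] at hpre
        exact (PySem.Chars.isIn_iff_infix _ _).mp
          ((PySem.Chars.exists_prefix_drop_iff_isIn t (d.drop k)).mp ⟨x - k, hpre⟩)
      rw [pvCnt_zero _ _ _ _ (fun x hx _ => hno x hx)]
      simp [pvFindLoop]
    · rw [if_neg hfind]
      have hq0 : 0 ≤ PySem.Chars.find (d.drop k) t := by
        have := PySem.Chars.neg_one_le_find (d.drop k) t; omega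
      have hqlen := PySem.Chars.find_le_length (d.drop k) t
      obtain ⟨hpref, hmin⟩ := PySem.Chars.find_spec (s := d.drop k) (sub := t) hq0
      set q := PySem.Chars.find (d.drop k) t with hq
      set i := k + q.toNat with hi
      have hcast : (k : Int) + q = (i : Int) := by omega
      have hiln : i ≤ d.length := by
        rw [List.length_drop] at hqlen; omega
      have hprefi : t <+: d.drop i := by
        rw [List.drop_drop] at hpref
        exact hpref
      have hmin' : ∀ x, k ≤ x → x < i → ¬ t <+: d.drop x := by
        intro x hx1 hx2 hpre
        apply hmin (x - k) (by omega)
        rw [List.drop_drop, show k + (x - k) = x by omega]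
        exact hpre
      rw [hcast]
      simp only [pvFindLoop]
      rw [if_pos (by omega : ¬ (i : Int) = -1)]
      rw [pvCnt_skip t d (d.length + 1) i k (by omega) hmin']
      rw [pvCnt_hit t d (d.length + 1) i (by omega) hprefi]
      by_cases hlast : i ≤ d.length - 1 ∨ d.length = 0
      · -- i + 1 ≤ d.length (or degenerate d = []): recurse with the invariant
        have hi1 : i + 1 ≤ d.length ∨ (i = 0 ∧ d.length = 0) := by omega
        rcases hi1 with hi1 | ⟨hi0, hd0⟩
        · rw [show ((i : Int) + 1) = ((i + 1 : Nat) : Int) by push_cast; ring]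
          rw [ih (i + 1) hi1 (by omega)]
          push_cast; ring
        · rw [pvFindFrom_past d t ((i : Int) + 1) (by omega)]
          rw [pvFindLoop_neg_one]
          rw [pvCnt_zero _ _ _ _ (by omega)]
          simp
      · -- i = d.length: the next find starts past the end and returns -1
        have hieq : i = d.length := by omega
        rw [pvFindFrom_past d t ((i : Int) + 1) (by omega)]
        rw [pvFindLoop_neg_one]
        rw [pvCnt_zero _ _ _ _ (by omega)]
        simp

-- A's outer loop equals the truncated count of dropLast-prefix positions (nonempty terme)
lemma pvA_cnt (t d : List Char) (hm : t.length ≠ 0) :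
    (PySem.List.pyRange 0 ((d.length : Int) - (t.length : Int) + 1)).foldl
        (fun occ i => if pvInner t d t.length i 1 = t.length then occ + 1 else occ) 0
      = (pvCnt t.dropLast d (d.length + 1 - t.length) 0 : Int) := by
  by_cases hmn : t.length ≤ d.length + 1
  · rw [show ((d.length : Int) - (t.length : Int) + 1)
        = ((d.length + 1 - t.length : Nat) : Int) by omega]
    rw [PySem.List.pyRange_zero_natCast, List.foldl_map]
    rw [PySem.List.foldl_ite_add_one (fun k : Nat => pvInner t d t.length (k : Int) 1 = t.length)]
    have hc : List.countP (fun k : Nat => decide (pvInner t d t.length (k : Int) 1 = t.length))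
        (List.range (d.length + 1 - t.length))
        = pvCnt t.dropLast d (d.length + 1 - t.length) 0 := by
      unfold pvCnt
      rw [Nat.sub_zero]
      apply List.countP_congr
      intro x hx
      rw [List.mem_range] at hx
      simp only [decide_eq_true_eq, Nat.zero_add]
      rw [pvInner_char t d t.length x 1 le_rfl (by omega),
        pvPrefix_char t d x (by omega) (by omega)]
      exact ⟨fun H u hu => H u (Nat.zero_le _) hu, fun H u _ hu => H u hu⟩
    rw [hc]
    omega
  · rw [show PySem.List.pyRange 0 ((d.length : Int) - (t.length : Int) + 1) = [] by
      simp [PySem.List.pyRange]; omega]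
    unfold pvCnt
    rw [show d.length + 1 - t.length - 0 = 0 by omega]
    simp [List.foldl]

-- full-window count of a nonempty pattern equals the window truncated by its length
lemma pvCnt_trunc (t d : List Char) (hm : t.length ≠ 0) :
    pvCnt t d (d.length + 1) 0 = pvCnt t d (d.length + 1 - t.length) 0 := by
  have hnopre : ∀ x : Nat, d.length + 1 - t.length ≤ x → ¬ t <+: d.drop x := by
    intro x hx hpre
    have := hpre.length_le
    rw [List.length_drop] at this
    omega
  by_cases hmn : t.length ≤ d.length + 1
  · unfold pvCnt
    simp only [Nat.sub_zero, Nat.zero_add]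
    conv_lhs => rw [show d.length + 1 = (d.length + 1 - t.length) + t.length by omega]
    rw [List.range_add, List.countP_append]
    have h0 : List.countP (fun off => decide (t <+: d.drop off))
        ((List.range t.length).map (fun j => d.length + 1 - t.length + j)) = 0 := by
      rw [List.countP_eq_zero]
      intro x hxm
      simp only [List.mem_map, List.mem_range] at hxm
      obtain ⟨j, _, rfl⟩ := hxm
      simp only [decide_eq_true_eq]
      exact fun h => hnopre _ (by omega) h
    rw [h0]
    omega
  · rw [pvCnt_zero _ _ _ _ (fun x _ _ => hnopre x (by omega)),
      pvCnt_zero _ _ _ _ (fun x _ hxW => absurd hxW (by omega))]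

lemma pvB_cnt (terme document : String) :
    ParcoursNaif_alt terme document
      = (pvCnt terme.toList document.toList (document.toList.length + 1) 0 : Int) := by
  have := pvLoop_inv terme.toList document.toList (document.toList.length + 2) 0
    (Nat.zero_le _) (by omega)
  simpa [ParcoursNaif_alt, PySem.Chars.findFrom_zero] using this

-- strict countP monotonicity used for the tightness proof
lemma pvCountP_lt {α : Type} (P Q : α → Bool) :
    ∀ l : List α, (∀ x ∈ l, Q x = true → P x = true) →
      ∀ x0 ∈ l, P x0 = true → Q x0 = false → List.countP Q l < List.countP P l := by
  intro l
  induction l with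
  | nil => intro _ x0 h; cases h
  | cons a l ih =>
    intro hmono x0 hx0 hP hQ
    rcases List.mem_cons.mp hx0 with rfl | hx0l
    · have hle : List.countP Q l ≤ List.countP P l :=
        List.countP_mono_left (fun x hx => hmono x (List.mem_cons_of_mem _ hx))
      simp [hP, hQ]
      omega
    · have hlt := ih (fun x hx => hmono x (List.mem_cons_of_mem _ hx)) x0 hx0l hP hQ
      have ha := hmono a (List.mem_cons_self)
      by_cases hQa : Q a = true
      · simp [hQa, ha hQa]; omega
      · simp [List.countP_cons, hQa]
        by_cases hPa : P a = true <;> simp [hPa] <;> omega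

-- A = pvCnt of the dropLast pattern (nonempty terme), as a standalone equation
lemma pvA_eq (terme document : String) (hm : terme.toList.length ≠ 0) :
    ParcoursNaif terme document
      = (pvCnt terme.toList.dropLast document.toList
          (document.toList.length + 1 - terme.toList.length) 0 : Int) := by
  simp only [ParcoursNaif]
  exact pvA_cnt terme.toList document.toList hm

lemma pvA_empty (terme document : String) (hm : terme.toList.length = 0) :
    ParcoursNaif terme document = 0 := by
  simp only [ParcoursNaif, hm]
  rw [show ((document.toList.length : Int) - (0 : Nat) + 1)
      = ((document.toList.length + 1 : Nat) : Int) by push_cast; ring]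
  rw [PySem.List.pyRange_zero_natCast, List.foldl_map]
  have hi : ∀ i : Int, pvInner terme.toList document.toList 0 i 1 = 1 := by
    intro i
    rw [pvInner, dif_neg (fun hc => absurd hc.1 (by omega))]
  simp [hi]

-- ===== VERDICT (by name: the statements are the Claim_ definitions above) =====
theorem ParcoursNaif_spec : Claim_unchanged_ParcoursNaif := by
  intro terme document _ hD
  have hm : terme.toList.length ≠ 0 := fun h0 =>
    hD (Or.inl (String.toList_eq_nil_iff.mp (List.length_eq_zero_iff.mp h0)))
  have hgood : ∀ i ∈ List.range (document.toList.length + 1 - terme.toList.length),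
      terme.toList.dropLast <+: document.toList.drop i → terme.toList <+: document.toList.drop i := by
    intro i hi hp
    by_contra hnp
    exact hD (Or.inr ⟨i, hi, hp, hnp⟩)
  show ParcoursNaif terme document = ParcoursNaif_alt terme document
  rw [pvA_eq terme document hm, pvB_cnt, pvCnt_trunc terme.toList document.toList hm]
  congr 1
  unfold pvCnt
  simp only [Nat.sub_zero, Nat.zero_add]
  apply List.countP_congr
  intro x hx
  simp only [decide_eq_true_eq]
  constructor
  · intro h
    exact hgood x hx h
  · intro h
    exact (List.dropLast_prefix _).trans h

theorem ParcoursNaif_changed : Claim_changed_ParcoursNaif := by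
  unfold Claim_changed_ParcoursNaif
  refine ⟨by decide, by decide, ?_, by decide, by decide⟩
  show ParcoursNaif "ab" "ac" = 1
  simp [ParcoursNaif, PySem.List.pyRange]
  rw [pvInner, pvInner]
  simp [pvCompareLettre, PySem.List.pyGetD, PySem.List.pyGet?, PySem.List.pyIdx?]

theorem ParcoursNaif_tight : Claim_exact_ParcoursNaif := by
  intro terme document _ hD
  rcases hD with hE | ⟨i, hi, hp, hnp⟩
  · -- terme empty: A = 0, B = len(document)+1 ≥ 1
    subst hE
    have hm : ("" : String).toList.length = 0 := rfl
    rw [pvA_empty _ _ hm, pvB_cnt]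
    have hfull : pvCnt ("" : String).toList document.toList (document.toList.length + 1) 0
        = document.toList.length + 1 := by
      unfold pvCnt
      rw [Nat.sub_zero]
      rw [List.countP_eq_length.mpr (fun x _ => by simp)]
      simp
    rw [hfull]
    intro h
    omega
  · have hm : terme.toList.length ≠ 0 := by
      intro h0
      rw [List.length_eq_zero_iff] at h0
      rw [h0] at hnp
      exact hnp (List.nil_prefix)
    rw [pvA_eq terme document hm, pvB_cnt, pvCnt_trunc terme.toList document.toList hm]
    have hlt : pvCnt terme.toList document.toList
        (document.toList.length + 1 - terme.toList.length) 0
        < pvCnt terme.toList.dropLast document.toList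
          (document.toList.length + 1 - terme.toList.length) 0 := by
      unfold pvCnt
      simp only [Nat.sub_zero, Nat.zero_add]
      refine pvCountP_lt _ _ _ ?_ i hi ?_ ?_
      · intro x _ hQ
        simp only [decide_eq_true_eq] at hQ ⊢
        exact (List.dropLast_prefix _).trans hQ
      · simpa using hp
      · simpa using hnp
    intro h
    omega
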